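-- pv_equiv track=rewrite | github.com/Walbert29/property-inventory-backend | challenge/test/challenge.py | blocks_numbers
-- ===== SOURCE A (Python) =====
-- from typing import List
--
-- def blocks_numbers(list_number: List[int]):
--     """
--     Sorts the numbers into individual blocks and returns a text string representing the blocks.
--
--     Args:
--         list_number (List[int]): List of numbers containing blocks separated by zeros.
--
--     Returns:
--         str: A text string representing individually ordered blocks of numbers.
--     """
--     block_numbers = []
--     numbers_temp = []
--     for key, value in enumerate(list_number):
--         if value != 0:
--             numbers_temp.append(value)
--
--         # Check if a zero has been found and if there are temporary numbers in the list
--         # This indicates the end of a block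
--         if (value == 0 and numbers_temp) or ((key+1) == len(list_number) and value != 0):
--             numbers_temp.sort()
--
--             #Create a string representation of sorted numbers by removing unwanted characters
--             number_text = str(numbers_temp).replace('[','').replace(']','').replace(',','').replace(' ','')
--             block_numbers.append(number_text)
--             numbers_temp = []
--
--         # This indicates an empty block
--         elif value == 0 and not numbers_temp:
--             block_numbers.append("X")
--         if ((key+1) == len(list_number) and value == 0):
--             block_numbers.append("X")
--
--     return " ".join(block_numbers)
-- ===== SOURCE B (Python) =====
-- from typing import List
--
-- def blocks_numbers(list_number: List[int]):
--     """Split on zeros, then render each block; empty blocks become 'X'."""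
--     if not list_number:
--         return ""
--     blocks = []
--     current = []
--     for value in list_number:
--         if value == 0:
--             blocks.append(current)
--             current = []
--         else:
--             current.append(value)
--     blocks.append(current)
--     return " ".join(
--         "".join(map(str, sorted(block))) if block else "X" for block in blocks
--     )
-- ===== Notes on version B (the rewrite author's own statement) =====
-- stated objective: simpler
-- what changed: Replaces A's interleaved single pass (with end-of-list index checks, a trailing-zero X append and str(list)+four .replace() cleanup) by an empty-list guard, a plain split-into-blocks-on-zeros pass, and a separate comprehension that renders each block with ''.join(map(str, sorted(block))) or 'X'.
import Mathlib
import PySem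

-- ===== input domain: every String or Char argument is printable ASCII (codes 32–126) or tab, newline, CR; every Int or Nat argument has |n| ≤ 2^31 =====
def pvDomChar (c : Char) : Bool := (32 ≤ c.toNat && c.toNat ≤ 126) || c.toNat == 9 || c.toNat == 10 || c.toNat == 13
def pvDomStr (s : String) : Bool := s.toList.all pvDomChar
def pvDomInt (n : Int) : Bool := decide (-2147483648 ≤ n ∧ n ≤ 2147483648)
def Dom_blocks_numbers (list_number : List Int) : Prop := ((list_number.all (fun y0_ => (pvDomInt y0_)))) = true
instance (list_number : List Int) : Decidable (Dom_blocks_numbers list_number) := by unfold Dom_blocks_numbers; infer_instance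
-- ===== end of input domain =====

-- B replaces A's interleaved single pass (with its end-of-list index checks and
-- str(list)+.replace cleanup) by a split-into-blocks pass followed by a render/join map.

-- ===== PORT A =====
-- str(numbers_temp) for a Python list of ints is '[' ++ ", ".join(map(str, …)) ++ ']' (exact),
-- then the four .replace(…, '') calls, transliterated with PySem.Chars.replace.
def pvFmtA (temp : List Int) : String :=
  let srt := PySem.List.sorted temp (fun x => x) false
  let s : List Char := '[' :: PySem.Chars.join [',', ' '] (srt.map PySem.Int.toChars) ++ [']']
  String.ofList (PySem.Chars.replace (PySem.Chars.replace (PySem.Chars.replace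
    (PySem.Chars.replace s ['['] []) [']'] []) [','] []) [' '] [])

-- the body of A's for-loop (key, value) with n = len(list_number), factored as a helper
def pvStepA (n : Nat) (st : List String × List Int) (kv : Int × Int) : List String × List Int :=
  let key := kv.1
  let value := kv.2
  let temp := if value ≠ 0 then st.2 ++ [value] else st.2
  let p :=
    if (value = 0 ∧ temp ≠ []) ∨ (key + 1 = (n : Int) ∧ value ≠ 0) then
      (st.1 ++ [pvFmtA temp], ([] : List Int))
    else if value = 0 ∧ temp = [] then (st.1 ++ ["X"], temp)
    else (st.1, temp)
  let bn := if key + 1 = (n : Int) ∧ value = 0 then p.1 ++ ["X"] else p.1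
  (bn, p.2)

def blocks_numbers (list_number : List Int) : String :=
  let st := (PySem.List.enumerate list_number).foldl (pvStepA list_number.length) ([], [])
  PySem.Str.join " " st.1

-- ===== PORT B =====
-- the per-block rendering of Source B's comprehension: '"".join(map(str, sorted(block))) if block else "X"'
def pvRender (block : List Int) : String :=
  if block = [] then "X"
  else PySem.Str.join "" ((PySem.List.sorted block (fun x => x) false).map PySem.Int.toStr)

def blocks_numbers_alt (list_number : List Int) : String :=
  if list_number = [] then ""
  else
    let st := list_number.foldl
      (fun (st : List (List Int) × List Int) value =>
        if value = 0 then (st.1 ++ [st.2], ([] : List Int)) else (st.1, st.2 ++ [value]))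
      ([], [])
    PySem.Str.join " " ((st.1 ++ [st.2]).map pvRender)

-- ===== PRECONDITION & SPEC =====
def Spec_blocks_numbers (list_number : List Int) (out : String) : Prop := out = blocks_numbers_alt list_number
instance (list_number : List Int) (out : String) : Decidable (Spec_blocks_numbers list_number out) := by unfold Spec_blocks_numbers; infer_instance

-- ===== CLAIM (what is proved, stated in full; the proofs are below) =====
def Claim_equal_blocks_numbers : Prop := ∀ (list_number : List Int), Dom_blocks_numbers list_number → Spec_blocks_numbers list_number (blocks_numbers list_number)

-- ===== LEMMAS AND PROOFS =====

-- chars that survive A's four .replace(…, '') calls (in composition order)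
def pvOkChar (c : Char) : Bool := c != ' ' && (c != ',' && (c != ']' && c != '['))

theorem pv_digitChar_ok : ∀ m : Nat, m < 10 → pvOkChar (Nat.digitChar m) = true := by
  intro m hm; interval_cases m <;> decide

theorem pv_toDigitsCore_ok (fuel : Nat) : ∀ (n : Nat) (ds : List Char),
    (∀ c ∈ ds, pvOkChar c = true) → ∀ c ∈ Nat.toDigitsCore 10 fuel n ds, pvOkChar c = true := by
  induction fuel with
  | zero => intro n ds h c hc; rw [Nat.toDigitsCore] at hc; exact h c hc
  | succ f ih =>
    intro n ds h c hc
    rw [Nat.toDigitsCore] at hc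
    have hd : pvOkChar (n % 10).digitChar = true :=
      pv_digitChar_ok _ (Nat.mod_lt _ (by norm_num))
    have hcons : ∀ a ∈ (n % 10).digitChar :: ds, pvOkChar a = true := by
      intro a ha; rcases List.mem_cons.mp ha with h1 | h1
      exacts [h1 ▸ hd, h a h1]
    split at hc
    · exact hcons c hc
    · exact ih _ _ hcons c hc

theorem pv_toChars_ok (n : Int) : ∀ c ∈ PySem.Int.toChars n, pvOkChar c = true := by
  intro c hc
  unfold PySem.Int.toChars at hc
  split at hc
  · rcases List.mem_cons.mp hc with h1 | h1
    · subst h1; decide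
    · exact pv_toDigitsCore_ok _ _ _ (by intro a ha; simp at ha) c h1
  · exact pv_toDigitsCore_ok _ _ _ (by intro a ha; simp at ha) c hc

theorem pv_replace_go_filter (c : Char) : ∀ (l : List Char) (fuel : Nat) (acc : List Char),
    l.length ≤ fuel →
    PySem.Chars.replace.go [c] [] fuel l acc = acc.reverse ++ l.filter (fun a => a != c) := by
  intro l
  induction l with
  | nil =>
    intro fuel acc _
    cases fuel <;> rw [PySem.Chars.replace.go] <;> simp
  | cons d t ih =>
    intro fuel acc hf
    cases fuel with
    | zero => simp at hf
    | succ f =>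
      rw [PySem.Chars.replace.go]
      by_cases hdc : d = c
      · subst hdc
        have hp : List.isPrefixOf [d] (d :: t) = true := by simp [List.isPrefixOf]
        simp only [hp, if_true, List.length_cons, List.length_nil, List.drop_succ_cons,
          List.drop_zero, List.reverse_nil, List.nil_append]
        rw [ih f acc (by simpa using hf)]
        simp
      · have hp : List.isPrefixOf [c] (d :: t) = false := by
          simp [List.isPrefixOf]; exact fun h => (hdc h.symm).elim
        simp only [hp, Bool.false_eq_true, if_false]
        rw [ih f (d :: acc) (by simpa using Nat.le_of_succ_le_succ hf)]
        have hb : (d != c) = true := by simp [hdc]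
        simp [hb]

theorem pv_replace_single (cs : List Char) (c : Char) :
    PySem.Chars.replace cs [c] [] = cs.filter (fun a => a != c) := by
  rw [PySem.Chars.replace]
  simp only [List.isEmpty, Bool.false_eq_true, if_false]
  exact pv_replace_go_filter c cs cs.length [] le_rfl

theorem pv_clean_eq (cs : List Char) :
    PySem.Chars.replace (PySem.Chars.replace (PySem.Chars.replace
      (PySem.Chars.replace cs ['['] []) [']'] []) [','] []) [' '] [] = cs.filter pvOkChar := by
  simp only [pv_replace_single, List.filter_filter]
  rfl

theorem pv_filter_join (ps : List (List Char))
    (h : ∀ p ∈ ps, ∀ c ∈ p, pvOkChar c = true) :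
    (PySem.Chars.join [',', ' '] ps).filter pvOkChar = PySem.Chars.join [] ps := by
  induction ps with
  | nil => simp [PySem.Chars.join_nil]
  | cons p ps ih =>
    cases ps with
    | nil =>
      rw [PySem.Chars.join_singleton, PySem.Chars.join_singleton]
      exact List.filter_eq_self.mpr (h p (by simp))
    | cons q r =>
      rw [PySem.Chars.join_cons_cons, PySem.Chars.join_cons_cons]
      rw [List.filter_append, List.filter_append]
      rw [List.filter_eq_self.mpr (h p (by simp))]
      rw [ih (by intro a ha; exact h a (List.mem_cons_of_mem _ ha))]
      rfl

theorem pv_fmt_eq_render (t : List Int) (ht : t ≠ []) : pvFmtA t = pvRender t := by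
  have hjoin : ∀ s : String, ∀ l : List Char, s.toList = l → s = String.ofList l := by
    intro s l h; subst h; exact String.ofList_toList.symm
  unfold pvFmtA pvRender
  simp only [ht, if_false]
  have hok : ∀ p ∈ (PySem.List.sorted t (fun x => x) false).map PySem.Int.toChars,
      ∀ c ∈ p, pvOkChar c = true := by
    intro p hp c hc
    rcases List.mem_map.mp hp with ⟨n, _, rfl⟩
    exact pv_toChars_ok n c hc
  rw [pv_clean_eq]
  refine (hjoin _ _ ?_).symm
  rw [PySem.Str.toList_join]
  simp only [List.filter_cons, List.filter_append]
  have h1 : pvOkChar '[' = false := by decide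
  have h2 : pvOkChar ']' = false := by decide
  simp only [h1, h2, Bool.false_eq_true, if_false, List.filter_nil,
    List.append_nil]
  rw [pv_filter_join _ hok]
  simp only [List.map_map]
  simp [Function.comp_def, PySem.Int.toList_toStr]

-- the block decomposition both loops compute
def pvBlocks : List Int → List Int → List (List Int)
  | cur, [] => [cur]
  | cur, v :: rest => if v = 0 then cur :: pvBlocks [] rest else pvBlocks (cur ++ [v]) rest

theorem pv_foldB (s : List Int) : ∀ (bs : List (List Int)) (cur : List Int),
    (s.foldl (fun (st : List (List Int) × List Int) value =>
        if value = 0 then (st.1 ++ [st.2], ([] : List Int)) else (st.1, st.2 ++ [value]))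
      (bs, cur)).1 ++
    [(s.foldl (fun (st : List (List Int) × List Int) value =>
        if value = 0 then (st.1 ++ [st.2], ([] : List Int)) else (st.1, st.2 ++ [value]))
      (bs, cur)).2] = bs ++ pvBlocks cur s := by
  induction s with
  | nil => intro bs cur; simp [pvBlocks]
  | cons v rest ih =>
    intro bs cur
    by_cases hv : v = 0
    · subst hv; simp only [List.foldl_cons, reduceIte, pvBlocks]
      rw [ih (bs ++ [cur]) []]; simp
    · simp only [List.foldl_cons, pvBlocks, if_neg hv]
      exact ih bs (cur ++ [v])

theorem pv_foldA (n : Nat) (s : List Int) : ∀ (k : Int) (bn : List String) (temp : List Int),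
    s ≠ [] → k + (s.length : Int) = (n : Int) →
    ((PySem.List.enumerate s k).foldl (pvStepA n) (bn, temp)).1
      = bn ++ (pvBlocks temp s).map pvRender := by
  induction s with
  | nil => intro _ _ _ hne _; exact (hne rfl).elim
  | cons v rest ih =>
    intro k bn temp _ hlen
    simp only [List.length_cons] at hlen
    rw [PySem.List.enumerate_cons, List.foldl_cons]
    cases rest with
    | nil =>
      have hk : k + 1 = (n : Int) := by simp only [List.length_nil] at hlen; omega
      rw [PySem.List.enumerate_nil, List.foldl_nil]
      by_cases hv : v = 0
      · subst hv
        by_cases ht : temp = []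
        · subst ht
          have hstep : pvStepA n (bn, []) (k, 0) = (bn ++ ["X"] ++ ["X"], []) := by
            simp [pvStepA, hk]
          rw [hstep]; simp [pvBlocks, pvRender]
        · have hstep : pvStepA n (bn, temp) (k, 0) = (bn ++ [pvFmtA temp] ++ ["X"], []) := by
            simp [pvStepA, hk, ht]
          rw [hstep]; simp [pvBlocks, pvRender, pv_fmt_eq_render temp ht, ht]
      · have hstep : pvStepA n (bn, temp) (k, v) = (bn ++ [pvFmtA (temp ++ [v])], []) := by
          simp [pvStepA, hk, hv]
        rw [hstep]
        have hne : temp ++ [v] ≠ [] := by simp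
        simp [pvBlocks, hv, pv_fmt_eq_render _ hne]
    | cons w rest' =>
      have hk : ¬ (k + 1 = (n : Int)) := by simp only [List.length_cons] at hlen; omega
      have hlen' : k + 1 + ((w :: rest').length : Int) = (n : Int) := by
        simp only [List.length_cons] at hlen ⊢; omega
      by_cases hv : v = 0
      · subst hv
        by_cases ht : temp = []
        · subst ht
          have hstep : pvStepA n (bn, []) (k, 0) = (bn ++ ["X"], []) := by
            simp [pvStepA, hk]
          rw [hstep, ih (k + 1) (bn ++ ["X"]) [] (by simp) hlen']
          simp [pvBlocks, pvRender]
        · have hstep : pvStepA n (bn, temp) (k, 0) = (bn ++ [pvFmtA temp], []) := by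
            simp [pvStepA, hk, ht]
          rw [hstep, ih (k + 1) (bn ++ [pvFmtA temp]) [] (by simp) hlen']
          simp [pvBlocks, pvRender, pv_fmt_eq_render temp ht, ht]
      · have hstep : pvStepA n (bn, temp) (k, v) = (bn, temp ++ [v]) := by
          simp [pvStepA, hk, hv]
        rw [hstep, ih (k + 1) bn (temp ++ [v]) (by simp) hlen']
        simp [pvBlocks, hv]

-- ===== VERDICT (by name: the statement is the Claim_ definition above) =====
theorem blocks_numbers_spec : Claim_equal_blocks_numbers := by
  intro list_number _
  unfold Spec_blocks_numbers blocks_numbers blocks_numbers_alt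
  cases hl : list_number with
  | nil => rw [PySem.List.enumerate_nil]; rfl
  | cons v rest =>
    simp only [reduceCtorEq, if_false]
    rw [pv_foldA (v :: rest).length (v :: rest) 0 [] [] (by simp) (by simp)]
    congr 1
    rw [pv_foldB (v :: rest) [] []]
    simp
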